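-- pv_equiv track=rewrite | github.com/Daniel-Brit/AULAS_POO | tuplas.py | contar_elementos_unicos
-- ===== SOURCE A (Python) =====
-- def contar_elementos_unicos(lista):
--     contagem = {}
--     resultado = []
--
--     for elemento in lista:
--         if elemento in contagem:
--             contagem[elemento] += 1
--         else:
--             contagem[elemento] = 1
--
--     for elemento in lista:
--         if contagem[elemento] > 0:
--             resultado.append((elemento, contagem[elemento]))
--             contagem[elemento] = 0
--
--     return resultado
-- ===== SOURCE B (Python) =====
-- def contar_elementos_unicos(lista):
--     posicao = {}
--     resultado = []
--     for e in lista: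
--         if e in posicao:
--             i = posicao[e]
--             elem, cnt = resultado[i]
--             resultado[i] = (elem, cnt + 1)
--         else:
--             posicao[e] = len(resultado)
--             resultado.append((e, 1))
--     return resultado
-- ===== Notes on version B (the rewrite author's own statement) =====
-- stated objective: alternative
-- what changed: B keeps no frequency dict at all: in a single pass it stores each new element's position in the output list and increments the count directly inside that output slot, so A's counter dict, its whole second pass over the list and its set-count-to-0 seen-marker disappear.
import Mathlib
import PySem

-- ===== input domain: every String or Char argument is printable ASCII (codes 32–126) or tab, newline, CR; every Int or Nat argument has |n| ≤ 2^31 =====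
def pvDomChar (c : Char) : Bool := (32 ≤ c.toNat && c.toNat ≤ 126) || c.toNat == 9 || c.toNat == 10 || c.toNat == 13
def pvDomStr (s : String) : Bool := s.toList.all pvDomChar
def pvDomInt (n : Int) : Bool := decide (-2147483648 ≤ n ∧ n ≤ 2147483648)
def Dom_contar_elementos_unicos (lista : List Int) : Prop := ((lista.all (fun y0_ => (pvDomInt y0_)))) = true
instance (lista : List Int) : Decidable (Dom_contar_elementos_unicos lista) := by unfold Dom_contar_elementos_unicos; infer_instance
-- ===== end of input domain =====

-- B keeps no counter dict: one pass stores each new element's position in the output list and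
-- increments the count inside that output slot; A's second pass and zero-marker disappear. Same return value.


-- ===== PORT A =====
-- first loop builds contagem; second loop emits (e, count) at each first occurrence and zeroes the count
def contar_elementos_unicos (lista : List Int) : List (Int × Int) :=
  let contagem : PySem.Dict Int Int :=
    lista.foldl (fun d e =>
      if d.contains e then d.insert e (d.getD e 0 + 1) else d.insert e 1) PySem.Dict.empty
  let st :=
    lista.foldl (fun (st : PySem.Dict Int Int × List (Int × Int)) e =>
      if 0 < st.1.getD e 0 then (st.1.insert e 0, st.2 ++ [(e, st.1.getD e 0)]) else st)
      (contagem, [])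
  st.2

-- ===== PORT B =====
-- one pass: posicao maps an element to its slot in resultado; counts are incremented in that slot
def contar_elementos_unicos_alt (lista : List Int) : List (Int × Int) :=
  (lista.foldl (fun (st : PySem.Dict Int Int × List (Int × Int)) e =>
    if st.1.contains e then
      let i := st.1.getD e 0
      match PySem.List.pyGet? st.2 i with
      | some (elem, cnt) => (st.1, PySem.List.pySetD st.2 i (elem, cnt + 1))
      | none => st  -- unreachable: i is always a valid index of resultado
    else
      (st.1.insert e (st.2.length : Int), st.2 ++ [(e, 1)]))
    (PySem.Dict.empty, [])).2

-- ===== PRECONDITION & SPEC =====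
def Spec_contar_elementos_unicos (lista : List Int) (out : List (Int × Int)) : Prop := out = contar_elementos_unicos_alt lista
instance (lista : List Int) (out : List (Int × Int)) : Decidable (Spec_contar_elementos_unicos lista out) := by unfold Spec_contar_elementos_unicos; infer_instance

-- ===== CLAIM (what is proved, stated in full; the proofs are below) =====
def Claim_equal_contar_elementos_unicos : Prop := ∀ (lista : List Int), Dom_contar_elementos_unicos lista → Spec_contar_elementos_unicos lista (contar_elementos_unicos lista)

-- ===== LEMMAS AND PROOFS =====

-- abstract model of A's second loop: the dict seen as a lookup function
def pvModel (l : List Int) (f : Int → Int) : List (Int × Int) :=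
  match l with
  | [] => []
  | e :: l => if 0 < f e then (e, f e) :: pvModel l (fun k => if k = e then 0 else f k)
              else pvModel l f

-- A's first loop is the standard counter fold (its else-branch inserts 1 = getD e 0 + 1)
lemma loopA1 (lista : List Int) :
    lista.foldl (fun d e =>
      if d.contains e then d.insert e (d.getD e 0 + 1) else d.insert e 1) PySem.Dict.empty
    = PySem.Dict.counter lista := by
  rw [← PySem.Dict.foldl_insert_getD_add_one_eq_counter]
  apply List.foldl_ext
  intro d e _
  by_cases h : d.contains e
  · simp [h]
  · simp only [Bool.not_eq_true] at h
    simp [h, PySem.Dict.getD_of_not_contains d (0 : Int) h]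

-- A's second loop computes pvModel of the dict's lookup function
lemma loop2_eq (l : List Int) (d : PySem.Dict Int Int) (res : List (Int × Int)) :
    (l.foldl (fun (st : PySem.Dict Int Int × List (Int × Int)) e =>
      if 0 < st.1.getD e 0 then (st.1.insert e 0, st.2 ++ [(e, st.1.getD e 0)]) else st)
      (d, res)).2
    = res ++ pvModel l (fun k => d.getD k 0) := by
  induction l generalizing d res with
  | nil => simp [pvModel]
  | cons e l ih =>
    simp only [List.foldl_cons, pvModel]
    by_cases h : 0 < d.getD e 0
    · rw [if_pos h, if_pos h, ih]
      have : (fun k => (d.insert e 0).getD k 0) = (fun k => if k = e then 0 else d.getD k 0) := by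
        funext k; rw [PySem.Dict.getD_insert]
      rw [this, List.append_assoc]
      rfl
    · rw [if_neg h, if_neg h, ih]

-- set(xs) commutes with filtering
lemma ofList_filter (l : List Int) (p : Int → Bool) :
    PySem.Set.ofList (l.filter p) = (PySem.Set.ofList l).filter p := by
  induction l with
  | nil => rfl
  | cons x l ih =>
    by_cases h : p x
    · rw [List.filter_cons_of_pos h, PySem.Set.ofList_cons, PySem.Set.ofList_cons, ih]
      simp only [PySem.Set.discard, List.filter_cons_of_pos h, List.filter_filter]
      congr 1
      apply List.filter_congr
      intro a _
      exact Bool.and_comm _ _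
    · rw [List.filter_cons_of_neg h, PySem.Set.ofList_cons, ih]
      simp only [PySem.Set.discard]
      rw [List.filter_cons_of_neg h, List.filter_comm]
      have hself : List.filter (fun y => !y == x) (List.filter p (PySem.Set.ofList l))
          = List.filter p (PySem.Set.ofList l) := by
        apply List.filter_eq_self.mpr
        intro a ha
        have hpa : p a := (List.mem_filter.mp ha).2
        have hax : a ≠ x := fun he => h (he ▸ hpa)
        simp [hax]
      rw [hself]

-- pvModel emits each first occurrence of a key with positive value, paired with that value
lemma pvModel_eq (l : List Int) (f : Int → Int) :
    pvModel l f
    = (PySem.Set.ofList (l.filter (fun e => decide (0 < f e)))).map (fun k => (k, f k)) := by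
  induction l generalizing f with
  | nil => rfl
  | cons x l ih =>
    by_cases h : 0 < f x
    · simp only [pvModel, if_pos h]
      rw [List.filter_cons_of_pos (by simpa using h), PySem.Set.ofList_cons, ih]
      simp only [PySem.Set.discard, List.map_cons]
      congr 1
      have h1 : (l.filter (fun e => decide (0 < if e = x then 0 else f e)))
          = List.filter (fun y => !y == x) (l.filter (fun e => decide (0 < f e))) := by
        rw [List.filter_filter]
        apply List.filter_congr
        intro a _
        by_cases hax : a = x <;> simp [hax]
      rw [h1, ofList_filter]
      apply List.map_congr_left
      intro a ha
      have hax : a ≠ x := by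
        have := (List.mem_filter.mp ha).2
        simpa using this
      simp [hax]
    · simp only [pvModel, if_neg h]
      rw [List.filter_cons_of_neg (by simpa using h)]
      exact ih f

-- setting the slot of e (a nodup list) rewrites the mapped function at e only
lemma set_map_idxOf (s : List Int) (g : Int → Int × Int) (e : Int) (v : Int × Int)
    (hnd : s.Nodup) (he : e ∈ s) :
    (s.map g).set (s.idxOf e) v = s.map (fun k => if k = e then v else g k) := by
  induction s with
  | nil => cases he
  | cons x s ih =>
    by_cases hx : x = e
    · subst hx
      simp only [List.idxOf_cons_self, List.map_cons, List.set_cons_zero]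
      congr 1
      apply List.map_congr_left
      intro a ha
      have : a ≠ x := fun h => (List.nodup_cons.mp hnd).1 (h ▸ ha)
      simp [this]
    · have he' : e ∈ s := by cases he with | head => exact absurd rfl hx | tail _ h => exact h
      rw [List.idxOf_cons_ne _ (fun h => hx h)]
      simp only [List.map_cons, List.set_cons_succ]
      rw [ih (List.nodup_cons.mp hnd).2 he', if_neg hx]
  
-- invariant of B's single pass: pos maps each seen element to its slot, the slots hold the counts so far
lemma loopB (rest : List Int) (s : List Int) (c : Int → Int) (pos : PySem.Dict Int Int)
    (hnd : s.Nodup)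
    (hmem : ∀ k, pos.contains k = true ↔ k ∈ s)
    (hval : ∀ k ∈ s, pos.getD k 0 = (s.idxOf k : Int))
    (hc0 : ∀ k, k ∉ s → c k = 0) :
    (rest.foldl (fun (st : PySem.Dict Int Int × List (Int × Int)) e =>
      if st.1.contains e then
        let i := st.1.getD e 0
        match PySem.List.pyGet? st.2 i with
        | some (elem, cnt) => (st.1, PySem.List.pySetD st.2 i (elem, cnt + 1))
        | none => st
      else
        (st.1.insert e (st.2.length : Int), st.2 ++ [(e, 1)]))
      (pos, s.map (fun k => (k, c k)))).2
    = (rest.foldl PySem.Set.add s).map (fun k => (k, c k + (rest.count k : Int))) := by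
  induction rest generalizing s c pos with
  | nil =>
    simp
  | cons e rest ih =>
    simp only [List.foldl_cons]
    by_cases he : e ∈ s
    · rw [if_pos ((hmem e).mpr he)]
      have hidx : s.idxOf e < s.length := List.idxOf_lt_length_of_mem he
      have hget : PySem.List.pyGet? (s.map (fun k => (k, c k))) (pos.getD e 0)
          = some (e, c e) := by
        rw [hval e he, PySem.List.pyGet?_natCast]
        have : (List.map (fun k => (k, c k)) s)[s.idxOf e]? = some (s[s.idxOf e], c (s[s.idxOf e])) := by
          simp [List.getElem?_eq_getElem (by simpa using hidx : s.idxOf e < (List.map (fun k => (k, c k)) s).length)]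
        rw [this, List.getElem_idxOf]
      simp only [hget]
      have hset : PySem.List.pySetD (s.map (fun k => (k, c k))) (pos.getD e 0) (e, c e + 1)
          = s.map (fun k => (k, if k = e then c e + 1 else c k)) := by
        rw [hval e he, PySem.List.pySetD_natCast, set_map_idxOf s _ e _ hnd he]
        apply List.map_congr_left
        intro a _
        by_cases hae : a = e <;> simp [hae]
      rw [hset, ih s (fun k => if k = e then c e + 1 else c k) pos hnd hmem hval
        (fun k hk => by
          have hke : k ≠ e := fun h => hk (by rw [h]; exact he)
          simp [hke, hc0 k hk])]
      have hadd : PySem.Set.add s e = s := by simp [PySem.Set.add, PySem.Set.contains, he]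
      rw [hadd]
      apply List.map_congr_left
      intro a _
      by_cases hae : a = e
      · subst hae; simp [List.count_cons_self]; ring
      · simp [List.count_cons, hae]
        exact fun h => absurd h.symm hae
    · rw [if_neg (fun h => he ((hmem e).mp h))]
      have happ : s.map (fun k => (k, c k)) ++ [(e, (1 : Int))]
          = (s ++ [e]).map (fun k => (k, if k = e then 1 else c k)) := by
        rw [List.map_append]
        congr 1
        · apply List.map_congr_left
          intro a ha
          have : a ≠ e := fun h => he (h ▸ ha)
          simp [this]
        · simp
      have hlen : ((s.map (fun k => (k, c k))).length : Int) = (s.length : Int) := by simp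
      rw [hlen, happ,
        ih (s ++ [e]) (fun k => if k = e then 1 else c k) (pos.insert e (s.length : Int))
          (by simp [List.nodup_append, hnd]; exact fun a ha h => he (h ▸ ha))
          (by intro k
              rw [PySem.Dict.contains_insert]
              by_cases hk : k = e <;> simp [hk, hmem k])
          (by intro k hk
              rw [PySem.Dict.getD_insert]
              by_cases hk' : k = e
              · subst hk'; rw [if_pos rfl, List.idxOf_append_of_notMem he, List.idxOf_cons_self]
                simp
              · have hks : k ∈ s := by
                  rcases List.mem_append.mp hk with h | h
                  · exact h
                  · exact absurd (List.mem_singleton.mp h) hk'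
                rw [if_neg hk', hval k hks, List.idxOf_append_of_mem hks])
          (by intro k hk
              have hks : k ∉ s := fun h => hk (List.mem_append.mpr (Or.inl h))
              have hke : k ≠ e := fun h => hk (by simp [h])
              simp [hke, hc0 k hks])]
      have hadd : PySem.Set.add s e = s ++ [e] := by simp [PySem.Set.add, PySem.Set.contains, he]
      rw [hadd]
      apply List.map_congr_left
      intro a _
      by_cases hae : a = e
      · subst hae; simp [List.count_cons_self, hc0 _ he]; ring
      · simp [List.count_cons, hae]
        exact fun h => absurd h.symm hae

-- B's pass computes the first-occurrence list of (k, count k)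
lemma alt_eq (lista : List Int) :
    contar_elementos_unicos_alt lista
    = (PySem.Set.ofList lista).map (fun k => (k, (lista.count k : Int))) := by
  unfold contar_elementos_unicos_alt
  have h := loopB lista [] (fun _ => 0) PySem.Dict.empty List.nodup_nil
    (by intro k; simp [PySem.Dict.contains_empty])
    (by intro k hk; cases hk)
    (by intro k _; rfl)
  simp only [List.map_nil] at h
  rw [h, PySem.Set.ofList_eq_foldl]
  simp

-- ===== VERDICT (by name: the statement is the Claim_ definition above) =====
theorem contar_elementos_unicos_spec : Claim_equal_contar_elementos_unicos := by
  intro lista _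
  show contar_elementos_unicos lista = contar_elementos_unicos_alt lista
  unfold contar_elementos_unicos
  simp only [loopA1, loop2_eq, List.nil_append]
  have hf : (fun k => (PySem.Dict.counter lista).getD k 0) = (fun k => (lista.count k : Int)) := by
    funext k; exact PySem.Dict.getD_counter lista k
  rw [hf, pvModel_eq, alt_eq]
  have hfl : lista.filter (fun e => decide (0 < (lista.count e : Int))) = lista := by
    apply List.filter_eq_self.mpr
    intro a ha
    simp [List.count_pos_iff.mpr ha]
  rw [hfl]
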